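-- pv_equiv track=rewrite | github.com/taoshijie111/MUSE | fs/molecule.py | basecount_to_name
-- ===== SOURCE A (Python) =====
-- def basecount_to_name(BaseCount, ShrinkLen=4):
--     """Generate name from BaseCount list"""
--     name = []
--     Case = -1
--     for b, n in BaseCount:
--         if n >= ShrinkLen:
--             name.append('-%s%d' % (b, n))
--             Case = 0
--         else:
--             if Case == 0:
--                 name.append('-')
--             name.extend([b for _ in range(n)])
--             Case = 1
--     name = ''.join(name)
--     if name[0] == '-':
--         name = name[1:]
--     return name
-- ===== SOURCE B (Python) =====
-- def basecount_to_name(BaseCount, ShrinkLen=4):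
--     """Generate name from BaseCount list (segment bodies joined by pairwise separators)."""
--     segs = [('%s%d' % (b, n), True) if n >= ShrinkLen else (b * n, False)
--             for b, n in BaseCount]
--     seps = [''] + ['-' if s or t else '' for (_, s), (_, t) in zip(segs, segs[1:])]
--     name = ''.join(sep + body for sep, (body, _) in zip(seps, segs))
--     return name[1:] if name.startswith('-') else name
-- ===== Notes on version B (the rewrite author's own statement) =====
-- stated objective: alternative
-- what changed: Replaces A's stateful Case-flag loop that emits '-'-prefixed pieces and strips a leading dash with a stateless pipeline: precompute (body, shrunk) segments, derive the separator between each adjacent pair by zipping the segment list with its tail, and join.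
-- outside the precondition, e.g. on basecount_to_name([('-A', 5)], 4): A returns '-A5', B returns 'A5'; on basecount_to_name([('', -2)], -5): A returns '-2', B returns '2'
import Mathlib
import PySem

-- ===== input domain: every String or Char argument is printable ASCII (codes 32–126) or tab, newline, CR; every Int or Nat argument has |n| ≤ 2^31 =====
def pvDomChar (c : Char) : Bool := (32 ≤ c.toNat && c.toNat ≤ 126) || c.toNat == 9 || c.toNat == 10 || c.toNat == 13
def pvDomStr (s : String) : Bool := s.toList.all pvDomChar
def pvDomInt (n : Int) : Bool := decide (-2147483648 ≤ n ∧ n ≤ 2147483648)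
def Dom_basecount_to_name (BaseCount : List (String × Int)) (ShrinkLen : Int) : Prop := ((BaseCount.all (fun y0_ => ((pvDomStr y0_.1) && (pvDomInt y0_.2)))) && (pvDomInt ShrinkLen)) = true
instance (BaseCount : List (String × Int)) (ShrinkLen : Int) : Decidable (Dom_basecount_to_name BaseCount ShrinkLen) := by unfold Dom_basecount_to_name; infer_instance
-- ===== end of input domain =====

-- B replaces A's stateful Case-flag loop by precomputed (body, shrunk) segments with
-- adjacency-derived separators (objective: alternative decomposition, same cost).
-- ===== PORT A =====
def basecount_to_name (BaseCount : List (String × Int)) (ShrinkLen : Int) : String :=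
  let st := BaseCount.foldl
    (fun (acc : List String × Int) e =>
      if ShrinkLen ≤ e.2 then
        (acc.1 ++ ["-" ++ e.1 ++ PySem.Int.toStr e.2], 0)
      else
        ((if acc.2 = 0 then acc.1 ++ ["-"] else acc.1) ++ List.replicate e.2.toNat e.1, 1))
    ([], -1)
  let name := PySem.Str.join "" st.1
  match PySem.Str.pyGet? name 0 with
  | some c => if c = '-' then PySem.Str.slice name (some 1) none else name
  | none => name  -- Python raises IndexError here (empty name); excluded by Pre_

-- ===== PORT B =====
-- one segment: ('%s%d' % (b, n), True) if shrunk else (b * n, False)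
def pvSeg (ShrinkLen : Int) (e : String × Int) : String × Bool :=
  if ShrinkLen ≤ e.2 then (e.1 ++ PySem.Int.toStr e.2, true)
  else (PySem.Str.join "" (List.replicate e.2.toNat e.1), false)

def basecount_to_name_alt (BaseCount : List (String × Int)) (ShrinkLen : Int) : String :=
  let segs := BaseCount.map (pvSeg ShrinkLen)
  let seps := "" :: (segs.zip segs.tail).map (fun p => if p.1.2 || p.2.2 then "-" else "")
  let name := PySem.Str.join "" ((seps.zip segs).map (fun p => p.1 ++ p.2.1))
  if PySem.Str.startswith name "-" then PySem.Str.slice name (some 1) none else name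

-- ===== PRECONDITION & SPEC =====
-- Pre_ excludes (a) inputs where every pair contributes an empty body, on which A raises
-- IndexError, and (b) inputs whose FIRST pair is shrunk with a rendered body beginning with
-- '-' (base starting with '-', or empty base with negative count): there the '-' separator
-- collides with body content and A's keep-vs-strip of the leading '-' is a defensible-corner
-- accident of its strip-one-char cleanup, which B resolves the other way.
def Pre_basecount_to_name (BaseCount : List (String × Int)) (ShrinkLen : Int) : Prop :=
  (∃ e ∈ BaseCount, ShrinkLen ≤ e.2 ∨ (0 < e.2 ∧ e.1 ≠ "")) ∧
  (∀ e ∈ BaseCount.take 1, ShrinkLen ≤ e.2 →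
      PySem.Str.startswith e.1 "-" = false ∧ (e.1 = "" → 0 ≤ e.2))
instance (BaseCount : List (String × Int)) (ShrinkLen : Int) : Decidable (Pre_basecount_to_name BaseCount ShrinkLen) := by unfold Pre_basecount_to_name; infer_instance
def pvWitness_basecount_to_name : (List (String × Int)) × Int := ([("A", 2), ("CG", 5)], 4)

def Spec_basecount_to_name (BaseCount : List (String × Int)) (ShrinkLen : Int) (out : String) : Prop := out = basecount_to_name_alt BaseCount ShrinkLen
instance (BaseCount : List (String × Int)) (ShrinkLen : Int) (out : String) : Decidable (Spec_basecount_to_name BaseCount ShrinkLen out) := by unfold Spec_basecount_to_name; infer_instance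

-- ===== CLAIM (what is proved, stated in full; the proofs are below) =====
def Claim_equal_basecount_to_name : Prop := ∀ (BaseCount : List (String × Int)) (ShrinkLen : Int), Dom_basecount_to_name BaseCount ShrinkLen → Pre_basecount_to_name BaseCount ShrinkLen → Spec_basecount_to_name BaseCount ShrinkLen (basecount_to_name BaseCount ShrinkLen)

-- ===== LEMMAS AND PROOFS =====

-- the body a pair contributes, on the character level
def pvBody (SL : Int) (e : String × Int) : List Char :=
  if SL ≤ e.2 then e.1.toList ++ PySem.Int.toChars e.2
  else (List.replicate e.2.toNat e.1.toList).flatten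

-- the characters A's loop still emits, given whether the previous pair was shrunk
def pvSegF (SL : Int) : List (String × Int) → Bool → List Char
  | [], _ => []
  | e :: t, prev =>
      (if prev = true ∨ SL ≤ e.2 then ['-'] else []) ++ pvBody SL e ++ pvSegF SL t (decide (SL ≤ e.2))

-- B's separator-joined character string
def pvSC (SL : Int) : List (String × Int) → List Char
  | [] => []
  | e :: t => pvBody SL e ++ pvSegF SL t (decide (SL ≤ e.2))

-- strip one leading '-'
def pvStrip (cs : List Char) : List Char :=
  if cs.head? = some '-' then cs.drop 1 else cs

theorem pv_intercalate_nil (l : List (List Char)) : List.intercalate [] l = l.flatten := by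
  induction l with
  | nil => simp [List.intercalate]
  | cons x t ih =>
    cases t with
    | nil => simp [List.intercalate]
    | cons y t' =>
      simp only [List.intercalate, List.intersperse] at ih ⊢
      simp [List.flatten, ih]

theorem pv_chars_join_nil (l : List (List Char)) : PySem.Chars.join [] l = l.flatten := by
  simp [PySem.Chars.join, pv_intercalate_nil]

theorem pv_join_toList (parts : List String) :
    (PySem.Str.join "" parts).toList = (parts.map String.toList).flatten := by
  simp [PySem.Str.join, pv_chars_join_nil]

theorem pv_seg_fst (SL : Int) (e : String × Int) : (pvSeg SL e).1.toList = pvBody SL e := by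
  by_cases h : SL ≤ e.2 <;>
    simp [pvSeg, pvBody, h, pv_chars_join_nil, PySem.Int.toStr,
      PySem.Int.toChars, List.map_replicate]

theorem pv_seg_snd (SL : Int) (e : String × Int) : (pvSeg SL e).2 = decide (SL ≤ e.2) := by
  by_cases h : SL ≤ e.2 <;> simp [pvSeg, h]

theorem pv_foldA_chars (SL : Int) (l : List (String × Int)) : ∀ (acc : List String) (c : Int),
    (PySem.Str.join "" ((l.foldl
      (fun (acc : List String × Int) e =>
        if SL ≤ e.2 then
          (acc.1 ++ ["-" ++ e.1 ++ PySem.Int.toStr e.2], 0)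
        else
          ((if acc.2 = 0 then acc.1 ++ ["-"] else acc.1) ++ List.replicate e.2.toNat e.1, 1))
      (acc, c)).1)).toList
    = (PySem.Str.join "" acc).toList ++ pvSegF SL l (c == 0) := by
  induction l with
  | nil => intro acc c; simp [pvSegF]
  | cons e t ih =>
    intro acc c
    by_cases h : SL ≤ e.2
    · simp only [List.foldl_cons, if_pos h]
      rw [ih]
      simp [pv_chars_join_nil, List.flatten_append, pvSegF, pvBody, h,
        PySem.Int.toStr, PySem.Int.toChars]
    · simp only [List.foldl_cons, if_neg h]
      by_cases hc : c = 0
      · simp only [if_pos hc]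
        rw [ih]
        simp [pv_chars_join_nil, List.flatten_append, pvSegF, pvBody, h, hc, List.map_replicate]
      · simp only [if_neg hc]
        rw [ih]
        have hcb : (c == 0) = false := by simp [hc]
        simp [pv_chars_join_nil, List.flatten_append, pvSegF, pvBody, h, hcb, List.map_replicate]

theorem pv_zipjoin (SL : Int) : ∀ (t : List (String × Int)) (p : String × Bool),
    ((((((p :: t.map (pvSeg SL)).zip (t.map (pvSeg SL))).map
        (fun q => if q.1.2 || q.2.2 then "-" else "")).zip (t.map (pvSeg SL))).map
        (fun q => q.1 ++ q.2.1)).map String.toList).flatten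
    = pvSegF SL t p.2 := by
  intro t
  induction t with
  | nil => intro p; simp [pvSegF]
  | cons e t' ih =>
    intro p
    simp only [List.map_cons, List.zip_cons_cons, List.flatten_cons]
    rw [ih (pvSeg SL e)]
    rw [pv_seg_snd]
    by_cases h : SL ≤ e.2
    · by_cases hp : p.2 = true <;>
        simp [pvSegF, pvSeg, pvBody, h, hp, PySem.Int.toStr, PySem.Int.toChars]
    · by_cases hp : p.2 = true <;>
        simp [pvSegF, pvSeg, pvBody, h, hp, pv_chars_join_nil, List.map_replicate]

theorem pv_prefix_head (cs : List Char) :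
    (List.isPrefixOf ['-'] cs) = (cs.head? == some '-') := by
  cases cs with
  | nil => simp [List.isPrefixOf]
  | cons a as =>
    by_cases h : a = '-'
    · simp [List.isPrefixOf, h]
    · simp [List.isPrefixOf, h]
      exact fun hcon => h hcon.symm

theorem pv_strip_str (s : String) (cs : List Char) (h : s.toList = cs) :
    (if PySem.Str.startswith s "-" then PySem.Str.slice s (some 1) none else s).toList
      = pvStrip cs := by
  have hsw : PySem.Str.startswith s "-" = List.isPrefixOf ['-'] cs := by
    simp [PySem.Str.startswith, PySem.Chars.startswith, h]
  rw [hsw, pv_prefix_head]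
  by_cases hh : cs.head? = some '-'
  · simp only [hh, beq_self_eq_true, if_pos]
    simp [pvStrip, hh, PySem.Str.slice, PySem.Chars.slice, h, PySem.List.slice_from_one,
      List.drop_one, List.tail]
  · have : (cs.head? == some '-') = false := by simp [hh]
    simp [this, pvStrip, hh, h]

theorem pv_strip_match (s : String) (cs : List Char) (h : s.toList = cs) :
    (match PySem.Str.pyGet? s 0 with
      | some c => if c = '-' then PySem.Str.slice s (some 1) none else s
      | none => s).toList = pvStrip cs := by
  have hg : PySem.Str.pyGet? s 0 = cs.head? := by
    simp [PySem.Str.pyGet?, PySem.Chars.pyGet?_eq_listPyGet?, h, PySem.List.pyGet?_zero]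
    cases cs <;> simp
  cases hh : cs.head? with
  | none => rw [hg, hh]; simp [pvStrip, hh, h]
  | some a =>
    rw [hg, hh]
    by_cases ha : a = '-'
    · subst ha
      simp [pvStrip, hh, PySem.Str.slice, PySem.Chars.slice, h, PySem.List.slice_from_one,
        List.drop_one]
    · simp [ha, pvStrip, hh, h]

theorem pv_a_chars (SL : Int) (l : List (String × Int)) :
    (basecount_to_name l SL).toList = pvStrip (pvSegF SL l false) := by
  have h := pv_foldA_chars SL l [] (-1)
  have hneg : ((-1 : Int) == 0) = false := by decide
  have h0 : (PySem.Str.join "" ([] : List String)).toList = ([] : List Char) := by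
    rw [pv_join_toList]; rfl
  rw [hneg, h0, List.nil_append] at h
  unfold basecount_to_name
  exact pv_strip_match _ _ h

theorem pv_alt_chars (SL : Int) (l : List (String × Int)) :
    (basecount_to_name_alt l SL).toList = pvStrip (pvSC SL l) := by
  cases l with
  | nil =>
    unfold basecount_to_name_alt
    apply pv_strip_str
    simp [pvSC]
  | cons e t =>
    unfold basecount_to_name_alt
    apply pv_strip_str
    simp only [List.map_cons, List.tail_cons, List.zip_cons_cons]
    rw [pv_join_toList]
    simp only [List.map_cons, List.flatten_cons]
    rw [pv_zipjoin SL t (pvSeg SL e), pv_seg_snd]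
    simp [pvSC, pv_seg_fst]

theorem pv_digitChar_isDigit : ∀ m, m < 10 → (Nat.digitChar m).isDigit = true := by decide

theorem pv_core_mem (b : Nat) (hb : 2 ≤ b) (hb' : b ≤ 10) :
    ∀ (f n : Nat) (acc : List Char) (c : Char),
      c ∈ Nat.toDigitsCore b f n acc → c ∈ acc ∨ c.isDigit = true := by
  intro f
  induction f with
  | zero => intro n acc c hc; rw [Nat.toDigitsCore] at hc; exact Or.inl hc
  | succ f ih =>
    intro n acc c hc
    rw [Nat.toDigitsCore] at hc
    have hd : (Nat.digitChar (n % b)).isDigit = true :=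
      pv_digitChar_isDigit _ (lt_of_lt_of_le (Nat.mod_lt _ (by omega)) hb')
    by_cases h : n / b = 0
    · simp only [h] at hc
      rcases List.mem_cons.mp hc with h1 | h1
      · exact Or.inr (h1 ▸ hd)
      · exact Or.inl h1
    · simp only [if_neg h] at hc
      rcases ih _ _ _ hc with h1 | h1
      · rcases List.mem_cons.mp h1 with h2 | h2
        · exact Or.inr (h2 ▸ hd)
        · exact Or.inl h2
      · exact Or.inr h1
  
theorem pv_core_len (b : Nat) : ∀ (f n : Nat) (acc : List Char),
    acc.length < (Nat.toDigitsCore b (f + 1) n acc).length := by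
  intro f
  induction f with
  | zero =>
    intro n acc
    rw [Nat.toDigitsCore]
    by_cases h : n / b = 0
    · simp [h]
    · rw [if_neg h, Nat.toDigitsCore]
      simp
  | succ f ih =>
    intro n acc
    rw [Nat.toDigitsCore]
    by_cases h : n / b = 0
    · simp [h]
    · rw [if_neg h]
      calc acc.length < (Nat.digitChar (n % b) :: acc).length := by simp
        _ < _ := ih _ _

theorem pv_toChars_head (n : Int) (hn : 0 ≤ n) (c : Char)
    (hc : (PySem.Int.toChars n).head? = some c) : c ≠ '-' := by
  have hneg : ¬ n < 0 := by omega
  rw [PySem.Int.toChars, if_neg hneg] at hc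
  have hmem : c ∈ Nat.toDigits 10 n.toNat := by
    cases hl : Nat.toDigits 10 n.toNat with
    | nil => rw [hl] at hc; simp at hc
    | cons a as => rw [hl] at hc; simp at hc; simp [hc]
  rcases pv_core_mem 10 (by norm_num) (by norm_num) _ _ _ _ hmem with h | h
  · simp at h
  · intro he; rw [he] at h; simp [Char.isDigit] at h

theorem pv_toChars_ne_nil (n : Int) : PySem.Int.toChars n ≠ [] := by
  rw [PySem.Int.toChars]
  by_cases h : n < 0
  · simp [h]
  · rw [if_neg h]
    have := pv_core_len 10 n.toNat n.toNat []
    intro hnil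
    rw [Nat.toDigits] at hnil
    rw [hnil] at this
    simp at this

theorem pv_toList_ne_nil (s : String) (h : s ≠ "") : s.toList ≠ [] := by
  intro hn
  exact h (by rw [← String.ofList_toList (s := s), hn])

theorem basecount_to_name_spec : Claim_equal_basecount_to_name := by
  intro BC SL _ hPre
  unfold Spec_basecount_to_name
  apply Eq.symm
  apply String.ext
  rw [pv_a_chars, pv_alt_chars]
  cases BC with
  | nil =>
    obtain ⟨⟨e, he, _⟩, _⟩ := hPre
    simp at he
  | cons e t =>
    by_cases h : SL ≤ e.2
    · have hhead := hPre.2 e (by simp) h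
      have h1 : pvSegF SL (e :: t) false = '-' :: pvSC SL (e :: t) := by
        simp [pvSegF, pvSC, h]
      have h2 : (pvSC SL (e :: t)).head? ≠ some '-' := by
        have hb : pvBody SL e = e.1.toList ++ PySem.Int.toChars e.2 := by simp [pvBody, h]
        by_cases hs : e.1 = ""
        · have h0 : (0 : Int) ≤ e.2 := hhead.2 hs
          have hne := pv_toChars_ne_nil e.2
          cases hl : PySem.Int.toChars e.2 with
          | nil => exact absurd hl hne
          | cons a as =>
            have ha := pv_toChars_head e.2 h0 a (by rw [hl]; rfl)
            simp [pvSC, hb, hs, hl]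
            exact fun hcon => ha hcon
        · have hne := pv_toList_ne_nil e.1 hs
          cases hl : e.1.toList with
          | nil => exact absurd hl hne
          | cons a as =>
            have hsw := hhead.1
            simp only [PySem.Str.startswith, PySem.Chars.startswith] at hsw
            rw [hl] at hsw
            have ha : a ≠ '-' := by
              intro hcon
              rw [hcon] at hsw
              simp [List.isPrefixOf] at hsw
            simp [pvSC, hb, hl]
            exact fun hcon => ha hcon
      rw [h1]
      have hA : pvStrip ('-' :: pvSC SL (e :: t)) = pvSC SL (e :: t) := by
        simp [pvStrip]
      have hB : pvStrip (pvSC SL (e :: t)) = pvSC SL (e :: t) := by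
        simp [pvStrip, h2]
      rw [hA, hB]
    · have h1 : pvSegF SL (e :: t) false = pvSC SL (e :: t) := by
        simp [pvSegF, pvSC, h]
      rw [h1]
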